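-- pv_equiv track=rewrite | github.com/tothetop0001/dog-food-audit-backend | app/services/ingredient_classification_service.py | classify_ingredient_list
-- ===== SOURCE A (Python) =====
-- from typing import List, Dict
--
-- MACRO_KEYWORDS = {
--     "protein": {
--         "high": ["chicken meal", "turkey meal", "salmon", "lamb meal"],
--         "good": ["egg", "duck", "chicken"],
--         "moderate": ["meat meal"],
--         "low": ["by-product meal", "poultry by-product"]
--     },
--     "fat": {
--         "high": ["chicken fat", "fish oil", "flaxseed oil"],
--         "good": ["vegetable oil", "canola oil"],
--         "low": ["animal fat", "tallow"]
--     },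
--     "carbohydrate": {
--         "high": ["pumpkin", "sweet potato", "brown rice"],
--         "good": ["oatmeal", "barley"],
--         "moderate": ["rice", "potato"],
--         "low": ["corn gluten meal", "wheat", "soybean meal", "corn"]
--     },
--     "fiber": {
--         "high": ["apple fiber", "beet pulp", "pumpkin fiber"],
--         "good": ["cellulose"],
--         "moderate": ["pea fiber"],
--         "low": ["wheat bran"]
--     }
-- }
--
-- MACRO_PRIORITY = ["protein", "fat", "fiber", "carbohydrate"]
--
-- QUALITY_RANK = {"High": 4, "Good": 3, "Moderate": 2, "Low": 1, "Unknown": 0}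
--
-- def normalize_text(text: str) -> str:
--     return text.lower().strip()
--
-- def find_macro_and_quality(ingredient: str):
--     """Return (macro, quality) if matched."""
--     ing = normalize_text(ingredient)
--     for macro in MACRO_PRIORITY:
--         for tier, keywords in MACRO_KEYWORDS[macro].items():
--             for kw in keywords:
--                 if kw in ing:
--                     return macro, tier.capitalize()
--     return None, None
--
-- def classify_ingredient_list(ingredients: List[str]) -> List[Dict]:
--     macro_best_quality = {"protein": "Unknown", "fat": "Unknown", "fiber": "Unknown", "carbohydrate": "Unknown"}
--
--     for ing in ingredients:
--         macro, quality = find_macro_and_quality(ing)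
--         if macro:
--             # If this macro already has a quality, compare and keep the best one
--             current_best = macro_best_quality.get(macro, "Unknown")
--             if QUALITY_RANK[quality] > QUALITY_RANK[current_best]:
--                 macro_best_quality[macro] = quality
--
--     return macro_best_quality
-- ===== SOURCE B (Python) =====
-- from typing import List, Dict
--
-- MACRO_KEYWORDS = {
--     "protein": {
--         "high": ["chicken meal", "turkey meal", "salmon", "lamb meal"],
--         "good": ["egg", "duck", "chicken"],
--         "moderate": ["meat meal"],
--         "low": ["by-product meal", "poultry by-product"]
--     },
--     "fat": {
--         "high": ["chicken fat", "fish oil", "flaxseed oil"],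
--         "good": ["vegetable oil", "canola oil"],
--         "low": ["animal fat", "tallow"]
--     },
--     "carbohydrate": {
--         "high": ["pumpkin", "sweet potato", "brown rice"],
--         "good": ["oatmeal", "barley"],
--         "moderate": ["rice", "potato"],
--         "low": ["corn gluten meal", "wheat", "soybean meal", "corn"]
--     },
--     "fiber": {
--         "high": ["apple fiber", "beet pulp", "pumpkin fiber"],
--         "good": ["cellulose"],
--         "moderate": ["pea fiber"],
--         "low": ["wheat bran"]
--     }
-- }
--
-- MACRO_PRIORITY = ["protein", "fat", "fiber", "carbohydrate"]
--
-- QUALITY_RANK = {"High": 4, "Good": 3, "Moderate": 2, "Low": 1, "Unknown": 0}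
--
-- # One flat, ordered lookup table: MACRO_PRIORITY order, then tier insertion order.
-- KEYWORD_TABLE = [(macro, tier.capitalize(), kw)
--                  for macro in MACRO_PRIORITY
--                  for tier, kws in MACRO_KEYWORDS[macro].items()
--                  for kw in kws]
--
-- def classify_ingredient_list(ingredients: List[str]) -> List[Dict]:
--     # one pass: collect the first-match (macro, quality) pair of each ingredient
--     pairs = []
--     for ing in ingredients:
--         s = ing.lower().strip()
--         for macro, quality, kw in KEYWORD_TABLE:
--             if kw in s:
--                 pairs.append((macro, quality))
--                 break
--     # group by macro and reduce with max under QUALITY_RANK, defaulting to "Unknown"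
--     return {m: max((q for mm, q in pairs if mm == m),
--                    key=QUALITY_RANK.__getitem__, default="Unknown")
--             for m in ["protein", "fat", "fiber", "carbohydrate"]}
-- ===== Notes on version B (the rewrite author's own statement) =====
-- stated objective: alternative
-- what changed: A classifies by scanning a nested macro->tier->keywords dict per ingredient and mutating a running-best dict; B flattens the keyword config once into a single ordered (macro, quality, keyword) table, collects each ingredient's first-match pair in one pass, then groups by macro and reduces each group with max under QUALITY_RANK, defaulting to 'Unknown'.
import Mathlib
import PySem

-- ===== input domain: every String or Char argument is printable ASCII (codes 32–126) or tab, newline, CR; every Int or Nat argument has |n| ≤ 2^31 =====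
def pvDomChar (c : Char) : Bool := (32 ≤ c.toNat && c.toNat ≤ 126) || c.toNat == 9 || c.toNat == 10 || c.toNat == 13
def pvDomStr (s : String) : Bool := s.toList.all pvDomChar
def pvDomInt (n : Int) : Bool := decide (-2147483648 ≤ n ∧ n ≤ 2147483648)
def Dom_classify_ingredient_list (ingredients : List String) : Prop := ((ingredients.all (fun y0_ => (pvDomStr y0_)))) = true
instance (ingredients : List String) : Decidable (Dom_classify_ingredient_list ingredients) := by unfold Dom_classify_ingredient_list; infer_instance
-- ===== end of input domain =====

-- B replaces A's incremental running-best dict updates by a flattened (macro, quality, keyword)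
-- lookup table scanned once per ingredient, then a group-by-macro max-reduce (objective: alternative decomposition).

-- ===== PORT A =====
-- shared module constants
def pvMACRO_KEYWORDS : PySem.Dict String (PySem.Dict String (List String)) :=
  PySem.Dict.ofList [
    ("protein", PySem.Dict.ofList [
      ("high", ["chicken meal", "turkey meal", "salmon", "lamb meal"]),
      ("good", ["egg", "duck", "chicken"]),
      ("moderate", ["meat meal"]),
      ("low", ["by-product meal", "poultry by-product"])]),
    ("fat", PySem.Dict.ofList [
      ("high", ["chicken fat", "fish oil", "flaxseed oil"]),
      ("good", ["vegetable oil", "canola oil"]),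
      ("low", ["animal fat", "tallow"])]),
    ("carbohydrate", PySem.Dict.ofList [
      ("high", ["pumpkin", "sweet potato", "brown rice"]),
      ("good", ["oatmeal", "barley"]),
      ("moderate", ["rice", "potato"]),
      ("low", ["corn gluten meal", "wheat", "soybean meal", "corn"])]),
    ("fiber", PySem.Dict.ofList [
      ("high", ["apple fiber", "beet pulp", "pumpkin fiber"]),
      ("good", ["cellulose"]),
      ("moderate", ["pea fiber"]),
      ("low", ["wheat bran"])])]

def pvMACRO_PRIORITY : List String := ["protein", "fat", "fiber", "carbohydrate"]

def pvQUALITY_RANK : PySem.Dict String Int :=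
  PySem.Dict.ofList [("High", 4), ("Good", 3), ("Moderate", 2), ("Low", 1), ("Unknown", 0)]

-- str.capitalize(): upper first char, lower the rest — exact on the ASCII domain
def pvCapitalize (s : String) : String :=
  match s.toList with
  | [] => ""
  | c :: rest => String.ofList (PySem.Chars.upperChar c :: PySem.Chars.lower rest)

def normalize_text (text : String) : String := PySem.Str.strip (PySem.Str.lower text)

-- triple early-return loop of A, as nested findSome?; MACRO_KEYWORDS[macro] via getD
-- (exact: every macro of MACRO_PRIORITY is a key); (None, None) ported as none
def find_macro_and_quality (ingredient : String) : Option (String × String) :=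
  let ing := normalize_text ingredient
  pvMACRO_PRIORITY.findSome? (fun mac =>
    ((pvMACRO_KEYWORDS.getD mac PySem.Dict.empty).items).findSome? (fun tk =>
      tk.2.findSome? (fun kw =>
        if PySem.Str.isIn kw ing then some (mac, pvCapitalize tk.1) else none)))

-- the body of A's for-loop
def classify_loop_body (d : PySem.Dict String String) (ing : String) : PySem.Dict String String :=
  match find_macro_and_quality ing with
  | none => d                     -- "if macro:" false
  | some (mac, quality) =>
    let current_best := d.getD mac "Unknown"
    -- QUALITY_RANK[...] via getD 0 (exact: the looked-up keys are always present)
    if pvQUALITY_RANK.getD quality 0 > pvQUALITY_RANK.getD current_best 0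
    then d.insert mac quality else d

def classify_ingredient_list (ingredients : List String) : List (String × String) :=
  let init : PySem.Dict String String :=
    PySem.Dict.ofList [("protein", "Unknown"), ("fat", "Unknown"), ("fiber", "Unknown"), ("carbohydrate", "Unknown")]
  let d := ingredients.foldl classify_loop_body init
  d.items

-- ===== PORT B =====
-- flat ordered lookup table (the Python comprehension over MACRO_PRIORITY / tiers / keywords)
def pvKEYWORD_TABLE : List (String × String × String) :=
  pvMACRO_PRIORITY.flatMap (fun mac =>
    ((pvMACRO_KEYWORDS.getD mac PySem.Dict.empty).items).flatMap (fun tk =>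
      tk.2.map (fun kw => (mac, pvCapitalize tk.1, kw))))

-- the inner for/break of B: first table entry whose keyword occurs in the normalized string
def pvFirstHit (ing : String) : Option (String × String) :=
  let s := PySem.Str.strip (PySem.Str.lower ing)
  (pvKEYWORD_TABLE.find? (fun t => PySem.Str.isIn t.2.2 s)).map (fun t => (t.1, t.2.1))

def classify_ingredient_list_alt (ingredients : List String) : List (String × String) :=
  let pairs := ingredients.filterMap pvFirstHit
  ["protein", "fat", "fiber", "carbohydrate"].map (fun m =>
    (m, PySem.List.maxD ((pairs.filter (fun p => p.1 == m)).map Prod.snd)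
          (fun q => pvQUALITY_RANK.getD q 0) "Unknown"))

-- ===== PRECONDITION & SPEC =====
def Spec_classify_ingredient_list (ingredients : List String) (out : List (String × String)) : Prop := out = classify_ingredient_list_alt ingredients
instance (ingredients : List String) (out : List (String × String)) : Decidable (Spec_classify_ingredient_list ingredients out) := by unfold Spec_classify_ingredient_list; infer_instance

-- ===== CLAIM (what is proved, stated in full; the proofs are below) =====
def Claim_equal_classify_ingredient_list : Prop := ∀ (ingredients : List String), Dom_classify_ingredient_list ingredients → Spec_classify_ingredient_list ingredients (classify_ingredient_list ingredients)

-- ===== LEMMAS AND PROOFS =====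

-- the two per-ingredient matchers agree
-- findSome? pushed through flatMap / map / find?+map (loop-shape facts for the table)
theorem findSome?_flatMap' {α β γ : Type} (xs : List α) (f : α → List β) (g : β → Option γ) :
    (xs.flatMap f).findSome? g = xs.findSome? (fun x => (f x).findSome? g) := by
  induction xs with
  | nil => rfl
  | cons a t ih => simp [List.flatMap_cons, List.findSome?_append, List.findSome?_cons, ih]; cases List.findSome? g (f a) <;> simp [Option.or]

theorem findSome?_map' {α β γ : Type} (xs : List α) (f : α → β) (g : β → Option γ) :
    (xs.map f).findSome? g = xs.findSome? (fun x => g (f x)) := by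
  induction xs with
  | nil => rfl
  | cons a t ih => simp [List.findSome?_cons, ih]

theorem find?_map_eq_findSome?' {α β : Type} (xs : List α) (c : α → Bool) (v : α → β) :
    (xs.find? c).map v = xs.findSome? (fun x => if c x then some (v x) else none) := by
  induction xs with
  | nil => rfl
  | cons a t ih => by_cases h : c a <;> simp [h, ih]

theorem find_eq_firstHit (s : String) : find_macro_and_quality s = pvFirstHit s := by
  unfold find_macro_and_quality pvFirstHit pvKEYWORD_TABLE normalize_text
  rw [find?_map_eq_findSome?', findSome?_flatMap']
  simp only [findSome?_flatMap', findSome?_map']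

-- every hit is one of the four macros, with a positive-rank quality
theorem firstHit_shape (s m q : String) (h : pvFirstHit s = some (m, q)) :
    m ∈ pvMACRO_PRIORITY ∧ 0 < pvQUALITY_RANK.getD q 0 := by
  simp only [pvFirstHit] at h
  cases hf : pvKEYWORD_TABLE.find? (fun t => PySem.Str.isIn t.2.2 (PySem.Str.strip (PySem.Str.lower s))) with
  | none => rw [hf] at h; simp at h
  | some t =>
    have ht := List.mem_of_find?_eq_some hf
    rw [hf] at h
    simp only [Option.map_some, Option.some.injEq, Prod.mk.injEq] at h
    have hall : ∀ t ∈ pvKEYWORD_TABLE, t.1 ∈ pvMACRO_PRIORITY ∧ 0 < pvQUALITY_RANK.getD t.2.1 0 := by decide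
    have := hall t ht
    rw [← h.1, ← h.2]
    exact this

-- abbreviations for the proofs
def pvRank (q : String) : Int := pvQUALITY_RANK.getD q 0

def pvStep (a q : String) : String := if pvRank q > pvRank a then q else a

def pvD4 (p f fi c : String) : PySem.Dict String String :=
  ⟨[("protein", p), ("fat", f), ("fiber", fi), ("carbohydrate", c)]⟩

def pvBestFor (m : String) (xs : List String) (v : String) : String :=
  xs.foldl (fun a i => match pvFirstHit i with
    | some (mm, q) => if mm = m then pvStep a q else a
    | none => a) v

def pvQuals (m : String) (xs : List String) : List String :=
  ((xs.filterMap pvFirstHit).filter (fun p => p.1 == m)).map Prod.snd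

-- A's loop body, with the matcher already rewritten to pvFirstHit
def pvBodyA (d : PySem.Dict String String) (ing : String) : PySem.Dict String String :=
  match pvFirstHit ing with
  | none => d
  | some (mac, quality) =>
    let current_best := d.getD mac "Unknown"
    if pvQUALITY_RANK.getD quality 0 > pvQUALITY_RANK.getD current_best 0
    then d.insert mac quality else d

theorem bodyA_eq (d : PySem.Dict String String) (ing : String) :
    classify_loop_body d ing = pvBodyA d ing := by
  unfold classify_loop_body pvBodyA
  rw [find_eq_firstHit]

-- getD / insert on the 4-key state, literal keys
theorem D4_getD (p f fi c m : String) (hm : m ∈ pvMACRO_PRIORITY) :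
    (pvD4 p f fi c).getD m "Unknown" =
      if m = "protein" then p else if m = "fat" then f else if m = "fiber" then fi else c := by
  fin_cases hm <;> simp [pvD4, PySem.Dict.getD, PySem.Dict.get?, List.find?]

theorem D4_insert (p f fi c m q : String) (hm : m ∈ pvMACRO_PRIORITY) :
    (pvD4 p f fi c).insert m q =
      if m = "protein" then pvD4 q f fi c else if m = "fat" then pvD4 p q fi c
      else if m = "fiber" then pvD4 p f q c else pvD4 p f fi q := by
  fin_cases hm <;> simp [pvD4, PySem.Dict.insert, PySem.Dict.contains, List.map]

-- the A loop computes a running best per macro, independently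
theorem loopA (xs : List String) : ∀ p f fi c,
    xs.foldl pvBodyA (pvD4 p f fi c) =
      pvD4 (pvBestFor "protein" xs p) (pvBestFor "fat" xs f)
           (pvBestFor "fiber" xs fi) (pvBestFor "carbohydrate" xs c) := by
  induction xs with
  | nil => intro p f fi c; simp only [List.foldl_nil, pvBestFor]
  | cons a t ih =>
    intro p f fi c
    rw [List.foldl_cons]
    cases hf : pvFirstHit a with
    | none =>
      have hb : pvBodyA (pvD4 p f fi c) a = pvD4 p f fi c := by rw [pvBodyA, hf]
      rw [hb, ih]
      simp only [pvBestFor, List.foldl_cons, hf]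
    | some mq =>
      obtain ⟨mm, q⟩ := mq
      obtain ⟨hmem, hq⟩ := firstHit_shape a mm q hf
      have hb : pvBodyA (pvD4 p f fi c) a =
          if pvRank q > pvRank ((pvD4 p f fi c).getD mm "Unknown")
          then (pvD4 p f fi c).insert mm q else pvD4 p f fi c := by
        rw [pvBodyA, hf]; rfl
      have hunf : ∀ m v, pvBestFor m (a :: t) v =
          pvBestFor m t (if mm = m then pvStep v q else v) := by
        intro m v; simp only [pvBestFor, List.foldl_cons, hf]
      rw [hb, hunf, hunf, hunf, hunf]
      fin_cases hmem <;>
        · rw [D4_getD _ _ _ _ _ (by decide), D4_insert _ _ _ _ _ _ (by decide)]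
          simp only [String.reduceEq, reduceIte]
          split_ifs with hr <;> simp [pvStep, hr, ih]

-- running best over xs = running best over the macro's collected qualities
theorem bestFor_eq_foldl_quals (m : String) (xs : List String) : ∀ v,
    pvBestFor m xs v = (pvQuals m xs).foldl pvStep v := by
  induction xs with
  | nil => intro v; simp [pvBestFor, pvQuals]
  | cons a t ih =>
    intro v
    cases hf : pvFirstHit a with
    | none =>
      have e1 : pvBestFor m (a :: t) v = pvBestFor m t v := by
        simp only [pvBestFor, List.foldl_cons, hf]
      have e2 : pvQuals m (a :: t) = pvQuals m t := by
        simp only [pvQuals, List.filterMap_cons, hf]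
      rw [e1, e2]; exact ih v
    | some mq =>
      obtain ⟨mm, q⟩ := mq
      by_cases h : mm = m
      · have e1 : pvBestFor m (a :: t) v = pvBestFor m t (pvStep v q) := by
          simp only [pvBestFor, List.foldl_cons, hf, h, if_true]
        have e2 : pvQuals m (a :: t) = q :: pvQuals m t := by
          simp only [pvQuals, List.filterMap_cons, hf, List.filter_cons, h, beq_self_eq_true,
            if_true, List.map_cons]
        rw [e1, e2, List.foldl_cons]; exact ih (pvStep v q)
      · have e1 : pvBestFor m (a :: t) v = pvBestFor m t v := by
          simp only [pvBestFor, List.foldl_cons, hf, if_neg h]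
        have e2 : pvQuals m (a :: t) = pvQuals m t := by
          have hne : ((mm, q).1 == m) = false := by simpa using h
          simp only [pvQuals, List.filterMap_cons, hf, List.filter_cons, hne,
            Bool.false_eq_true, if_false]
        rw [e1, e2]; exact ih v

-- Python max(…, key, default) over a nonempty list is the running-best fold from its head
theorem maxD_cons (t : List String) : ∀ y : String,
    PySem.List.maxD (y :: t) (fun q => pvQUALITY_RANK.getD q 0) "Unknown" = t.foldl pvStep y := by
  induction t with
  | nil => intro y; simp [PySem.List.maxD, PySem.List.max?]
  | cons z t ih =>
    intro y
    have h : PySem.List.maxD (y :: z :: t) (fun q => pvQUALITY_RANK.getD q 0) "Unknown" =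
        PySem.List.maxD (pvStep y z :: t) (fun q => pvQUALITY_RANK.getD q 0) "Unknown" := by
      simp only [PySem.List.maxD, PySem.List.max?, List.foldl_cons, pvStep, pvRank, gt_iff_lt]
      rw [apply_ite some]
    rw [h, ih, List.foldl_cons]

theorem foldl_step_eq_maxD (ys : List String) (hpos : ∀ y ∈ ys, 0 < pvRank y) :
    ys.foldl pvStep "Unknown" = PySem.List.maxD ys (fun q => pvQUALITY_RANK.getD q 0) "Unknown" := by
  cases ys with
  | nil => rfl
  | cons y t =>
    have hy : pvStep "Unknown" y = y := by
      have h0 : pvRank "Unknown" = 0 := by decide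
      simp [pvStep, gt_iff_lt, h0, hpos y (by simp)]
    rw [List.foldl_cons, hy, maxD_cons]

theorem quals_pos (m : String) (xs : List String) : ∀ y ∈ pvQuals m xs, 0 < pvRank y := by
  intro y hy
  simp only [pvQuals, List.mem_map, List.mem_filter, List.mem_filterMap] at hy
  obtain ⟨⟨mm, q⟩, ⟨⟨ing, _, hf⟩, _⟩, hsnd⟩ := hy
  have := (firstHit_shape ing mm q hf).2
  rw [← hsnd] at *
  exact this

-- ===== VERDICT (by name: the statement is the Claim_ definition above) =====
theorem classify_ingredient_list_spec : Claim_equal_classify_ingredient_list := by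
  intro xs _
  unfold Spec_classify_ingredient_list classify_ingredient_list classify_ingredient_list_alt
  have hinit : PySem.Dict.ofList
      [("protein", "Unknown"), ("fat", "Unknown"), ("fiber", "Unknown"), ("carbohydrate", "Unknown")] =
      pvD4 "Unknown" "Unknown" "Unknown" "Unknown" := by decide
  have hbody : classify_loop_body = pvBodyA := funext fun d => funext fun ing => bodyA_eq d ing
  dsimp only
  rw [hinit, hbody, loopA]
  simp only [List.map_cons, List.map_nil, pvD4]
  refine congrArg₂ _ ?_ (congrArg₂ _ ?_ (congrArg₂ _ ?_ (congrArg₂ _ ?_ rfl))) <;>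
  · refine congrArg _ ?_
    rw [bestFor_eq_foldl_quals, foldl_step_eq_maxD _ (quals_pos _ _)]
    rfl
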